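-- pv_equiv track=rewrite | github.com/ricardoortega97/tip101Sessions | Session3_2.py | sumOfUniqueElements
-- ===== SOURCE A (Python) =====
-- def sumOfUniqueElements(lst1, lst2):
--   unique_sum = 0
--
--   for num in lst1:
--       # Count occurrences of num in lst1
--       count = 0
--       for x in lst1:
--           if x == num:
--               count += 1
--
--       # Check if num is unique in lst1 and not in lst2
--       if count == 1:
--           in_lst2 = False
--           for y in lst2:
--               if y == num:
--                   in_lst2 = True
--                   break
--
--           if not in_lst2:
--               unique_sum += num
--
--   return unique_sum
-- ===== SOURCE B (Python) =====
-- def sumOfUniqueElements(lst1, lst2):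
--     # Streaming one-pass algorithm: add a value to the running total the first
--     # time it is seen (if allowed), subtract it back when a second copy arrives.
--     blocked = set(lst2)
--     seen = set()
--     dup = set()
--     total = 0
--     for num in lst1:
--         if num in dup:
--             continue
--         if num in seen:
--             dup.add(num)
--             if num not in blocked:
--                 total -= num
--         else:
--             seen.add(num)
--             if num not in blocked:
--                 total += num
--     return total
-- ===== Notes on version B (the rewrite author's own statement) =====
-- stated objective: faster
-- what changed: Replaces A's nested rescans by a streaming single pass with a compensating accumulator: each value is added to the total on its first occurrence (if absent from lst2) and subtracted back on its second, so no count is ever computed.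
import Mathlib
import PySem

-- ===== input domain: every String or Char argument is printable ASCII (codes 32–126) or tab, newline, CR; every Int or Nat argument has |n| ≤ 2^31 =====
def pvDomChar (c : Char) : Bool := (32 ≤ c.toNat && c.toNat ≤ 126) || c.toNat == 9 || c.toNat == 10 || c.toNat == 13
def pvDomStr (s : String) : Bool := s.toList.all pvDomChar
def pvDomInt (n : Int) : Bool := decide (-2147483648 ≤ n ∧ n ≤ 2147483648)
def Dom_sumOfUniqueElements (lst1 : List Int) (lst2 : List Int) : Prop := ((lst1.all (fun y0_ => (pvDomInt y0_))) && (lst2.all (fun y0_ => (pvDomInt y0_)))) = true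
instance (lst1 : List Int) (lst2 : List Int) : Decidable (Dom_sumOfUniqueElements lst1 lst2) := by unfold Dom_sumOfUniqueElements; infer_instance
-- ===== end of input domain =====

-- B replaces A's nested rescans by a streaming single pass with a compensating accumulator:
-- a value is added to the total on its first occurrence (if absent from lst2) and
-- subtracted back on its second occurrence, so no count is ever computed.

-- ===== PORT A =====
-- literal transliteration: for each num of lst1, recount num over lst1, then scan lst2
-- ('break' on the first hit only stops early; the fold's boolean is the same value)
def sumOfUniqueElements (lst1 : List Int) (lst2 : List Int) : Int :=
  lst1.foldl (fun unique_sum num =>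
    let count : Int := lst1.foldl (fun c x => if x == num then c + 1 else c) 0
    if count == 1 then
      let in_lst2 : Bool := lst2.foldl (fun b y => b || (y == num)) false
      if !in_lst2 then unique_sum + num else unique_sum
    else unique_sum) 0

-- ===== PORT B =====
-- the loop body of Source B (state: seen, dup, total)
def pvStepB (blocked : PySem.Set Int) (st : PySem.Set Int × PySem.Set Int × Int)
    (num : Int) : PySem.Set Int × PySem.Set Int × Int :=
  let (seen, dup, total) := st
  if PySem.Set.contains dup num then st            -- continue
  else if PySem.Set.contains seen num then
    (seen, PySem.Set.add dup num,
     if !(PySem.Set.contains blocked num) then total - num else total)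
  else
    (PySem.Set.add seen num, dup,
     if !(PySem.Set.contains blocked num) then total + num else total)

def sumOfUniqueElements_alt (lst1 : List Int) (lst2 : List Int) : Int :=
  let blocked : PySem.Set Int := PySem.Set.ofList lst2
  (lst1.foldl (pvStepB blocked) (PySem.Set.empty, PySem.Set.empty, 0)).2.2

-- ===== PRECONDITION & SPEC =====
def Spec_sumOfUniqueElements (lst1 : List Int) (lst2 : List Int) (out : Int) : Prop := out = sumOfUniqueElements_alt lst1 lst2
instance (lst1 : List Int) (lst2 : List Int) (out : Int) : Decidable (Spec_sumOfUniqueElements lst1 lst2 out) := by unfold Spec_sumOfUniqueElements; infer_instance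

-- ===== CLAIM =====
def Claim_equal_sumOfUniqueElements : Prop := ∀ (lst1 : List Int) (lst2 : List Int), Dom_sumOfUniqueElements lst1 lst2 → Spec_sumOfUniqueElements lst1 lst2 (sumOfUniqueElements lst1 lst2)

-- ===== LEMMAS AND PROOFS =====

-- the common predicate: unique in lst1 and not in lst2
def pvUniq (lst1 lst2 : List Int) (n : Int) : Bool :=
  (lst1.count n == 1) && !(lst2.contains n)

-- a conditional summing fold is the sum of the filtered list
theorem foldl_sum_if (l : List Int) (p : Int → Bool) (a : Int) :
    l.foldl (fun acc x => if p x then acc + x else acc) a = a + (l.filter p).sum := by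
  induction l generalizing a with
  | nil => simp
  | cons x xs ih =>
    by_cases h : p x = true <;> simp [List.foldl_cons, h, ih, add_assoc]

-- A's counting loop is List.count
theorem foldl_count (l : List Int) (num : Int) (c : Int) :
    l.foldl (fun c x => if x == num then c + 1 else c) c = c + (l.count num : Int) := by
  induction l generalizing c with
  | nil => simp
  | cons x xs ih =>
    rw [List.foldl_cons, ih, List.count_cons]
    by_cases h : x = num
    · simp [h]; ring
    · simp [h, Ne.symm h]

-- A's membership loop is List.contains
theorem foldl_mem (l : List Int) (num : Int) (b : Bool) :
    l.foldl (fun b y => b || (y == num)) b = (b || l.contains num) := by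
  induction l generalizing b with
  | nil => simp
  | cons x xs ih =>
    rw [List.foldl_cons, ih]
    by_cases h : x = num
    · simp [h]
    · have hf : (x == num) = false := beq_eq_false_iff_ne.mpr h
      simp [hf, Ne.symm h]

theorem a_eq_filter_sum (lst1 lst2 : List Int) :
    sumOfUniqueElements lst1 lst2 = (lst1.filter (pvUniq lst1 lst2)).sum := by
  unfold sumOfUniqueElements
  rw [PySem.List.foldl_congr_mem' (g := fun acc x => if pvUniq lst1 lst2 x then acc + x else acc)]
  · rw [foldl_sum_if]; ring
  · intro x _ acc
    simp only [foldl_count, foldl_mem, pvUniq, Int.zero_add, Bool.false_or]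
    by_cases h1 : lst1.count x = 1 <;> by_cases h2 : lst2.contains x = true <;>
      simp [h1, h2]

-- ===== B-side: the compensating-sum invariant =====

-- what the streaming total represents after reading q: the sum of the values that are
-- (so far) unique in q and not blocked
def pvG (blk : List Int) (q : List Int) : Int :=
  (q.map (fun y => if q.count y == 1 && !(blk.contains y) then y else 0)).sum

-- summing two functions that differ only at x differs by count x times the gap
theorem map_sum_diff (l : List Int) (f g : Int → Int) (x : Int)
    (h : ∀ y, y ≠ x → f y = g y) :
    (l.map f).sum = (l.map g).sum + (l.count x : Int) * (f x - g x) := by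
  induction l with
  | nil => simp
  | cons a l ih =>
    rw [List.map_cons, List.map_cons, List.sum_cons, List.sum_cons, ih, List.count_cons]
    by_cases ha : a = x
    · subst ha; simp; ring
    · rw [h a ha]
      have : (a == x) = false := beq_eq_false_iff_ne.mpr ha
      simp [this]; ring

-- how the represented sum changes when one more element arrives
theorem pvG_step (blk p : List Int) (x : Int) :
    pvG blk (p ++ [x]) = pvG blk p +
      (if p.count x = 0 then (if blk.contains x then 0 else x)
       else if p.count x = 1 then (if blk.contains x then 0 else -x) else 0) := by
  unfold pvG
  have hcnt : ∀ y, (p ++ [x]).count y = p.count y + (if x = y then 1 else 0) := by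
    intro y
    rw [List.count_append, List.count_singleton]
    by_cases h : x = y <;> simp [h, beq_iff_eq]
  rw [List.map_append, List.sum_append]
  rw [map_sum_diff (f := fun y => if (p ++ [x]).count y == 1 && !(blk.contains y) then y else 0)
        (g := fun y => if p.count y == 1 && !(blk.contains y) then y else 0) (x := x)
        (h := by
          intro y hy
          have hxy : x ≠ y := Ne.symm hy
          simp only [hcnt y, hxy, if_false, Nat.add_zero])]
  simp only [List.map_cons, List.map_nil, List.sum_cons, List.sum_nil, hcnt x]
  rcases Nat.lt_trichotomy (p.count x) 1 with h0 | h1 | h2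
  · have h0' : p.count x = 0 := Nat.lt_one_iff.mp h0
    by_cases hb : x ∈ blk <;> simp [h0', hb] <;> ring
  · by_cases hb : x ∈ blk <;> simp [h1, hb]
  · have hne1 : ¬ (p.count x = 1) := by omega
    have hne0 : ¬ (p.count x = 0) := by omega
    have hne2 : ¬ (p.count x + 1 = 1) := by omega
    by_cases hb : x ∈ blk <;> simp [hne0, hne1, hne2, hb]

-- the loop invariant: with seen/dup faithful to the processed prefix p, the fold over the
-- remaining l adds exactly the change of the represented sum
theorem loopB (blk : PySem.Set Int) (l : List Int) :
    ∀ (p : List Int) (seen dup : PySem.Set Int) (t : Int),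
    (∀ y, y ∈ seen ↔ 1 ≤ p.count y) →
    (∀ y, y ∈ dup ↔ 2 ≤ p.count y) →
    (l.foldl (pvStepB blk) (seen, dup, t)).2.2 = t + pvG blk (p ++ l) - pvG blk p := by
  induction l with
  | nil => intro p seen dup t _ _; simp
  | cons x xs ih =>
    intro p seen dup t hs hd
    have hcnt : ∀ y, (p ++ [x]).count y = p.count y + (if x = y then 1 else 0) := by
      intro y
      rw [List.count_append, List.count_singleton]
      by_cases h : x = y <;> simp [h, beq_iff_eq]
    have hassoc : p ++ x :: xs = (p ++ [x]) ++ xs := by simp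
    rw [List.foldl_cons]
    by_cases hdx : x ∈ dup
    · -- already a duplicate: skip
      have hc2 : 2 ≤ p.count x := (hd x).mp hdx
      have hstep : pvStepB blk (seen, dup, t) x = (seen, dup, t) := by
        simp [pvStepB, hdx]
      rw [hstep, ih (p ++ [x]) seen dup t
            (by intro y; rw [hs y, hcnt y]; by_cases h : x = y
                · subst h; omega
                · simp [h])
            (by intro y; rw [hd y, hcnt y]; by_cases h : x = y
                · subst h; omega
                · simp [h])]
      rw [hassoc, pvG_step]
      have h0 : ¬ (p.count x = 0) := by omega
      have h1 : ¬ (p.count x = 1) := by omega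
      simp [h0, h1]
    · by_cases hsx : x ∈ seen
      · -- second occurrence: subtract it back
        have hc1l : 1 ≤ p.count x := (hs x).mp hsx
        have hc2 : ¬ (2 ≤ p.count x) := fun h => hdx ((hd x).mpr h)
        have hc1 : p.count x = 1 := by omega
        have hstep : pvStepB blk (seen, dup, t) x =
            (seen, PySem.Set.add dup x,
             if !(PySem.Set.contains blk x) then t - x else t) := by
          simp [pvStepB, hdx, hsx]
        rw [hstep, ih (p ++ [x]) seen (PySem.Set.add dup x) _
              (by intro y; rw [hs y, hcnt y]; by_cases h : x = y
                  · subst h; omega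
                  · simp [h])
              (by intro y
                  rw [PySem.Set.mem_add, hd y, hcnt y]
                  by_cases h : x = y
                  · subst h; simp [hc1]
                  · simp [h, Ne.symm h])]
        rw [hassoc, pvG_step]
        have h0 : ¬ (p.count x = 0) := by omega
        by_cases hb : x ∈ blk
        · simp [hc1, hb, PySem.Set.contains]
        · simp [hc1, hb, PySem.Set.contains]; ring
      · -- first occurrence: add it
        have hc0 : p.count x = 0 := by
          have h1 : ¬ (1 ≤ p.count x) := fun h => hsx ((hs x).mpr h)
          omega
        have hstep : pvStepB blk (seen, dup, t) x =
            (PySem.Set.add seen x, dup,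
             if !(PySem.Set.contains blk x) then t + x else t) := by
          simp [pvStepB, hdx, hsx]
        rw [hstep, ih (p ++ [x]) (PySem.Set.add seen x) dup _
              (by intro y
                  rw [PySem.Set.mem_add, hs y, hcnt y]
                  by_cases h : x = y
                  · subst h; simp [hc0]
                  · simp [h, Ne.symm h])
              (by intro y; rw [hd y, hcnt y]; by_cases h : x = y
                  · subst h; simp [hc0]
                  · simp [h])]
        rw [hassoc, pvG_step]
        by_cases hb : x ∈ blk
        · simp [hc0, hb, PySem.Set.contains]
        · simp [hc0, hb, PySem.Set.contains]; ring

-- a sum of "value or 0" is the sum of the filtered list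
theorem map_if_sum (l : List Int) (p : Int → Bool) :
    (l.map (fun y => if p y then y else 0)).sum = (l.filter p).sum := by
  induction l with
  | nil => simp
  | cons a l ih => by_cases h : p a = true <;> simp [h, ih]

theorem b_eq_filter_sum (lst1 lst2 : List Int) :
    sumOfUniqueElements_alt lst1 lst2 = (lst1.filter (pvUniq lst1 lst2)).sum := by
  unfold sumOfUniqueElements_alt
  rw [loopB (PySem.Set.ofList lst2) lst1 [] PySem.Set.empty PySem.Set.empty 0
        (by intro y; simp [PySem.Set.empty]) (by intro y; simp [PySem.Set.empty])]
  have hb : ∀ y : Int, (PySem.Set.ofList lst2 : List Int).contains y = lst2.contains y := by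
    intro y; rw [Bool.eq_iff_iff]; simp [PySem.Set.mem_ofList]
  have hG : pvG (PySem.Set.ofList lst2) lst1 = (lst1.filter (pvUniq lst1 lst2)).sum := by
    unfold pvG
    rw [← map_if_sum lst1 (pvUniq lst1 lst2)]
    exact congrArg List.sum (List.map_congr_left (fun y _ => by simp [pvUniq, hb]))
  have h0 : pvG (PySem.Set.ofList lst2) [] = 0 := by simp [pvG]
  simp only [List.nil_append]
  rw [hG, h0]; ring

-- ===== VERDICT =====
theorem sumOfUniqueElements_spec : Claim_equal_sumOfUniqueElements := by
  intro lst1 lst2 _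
  unfold Spec_sumOfUniqueElements
  rw [a_eq_filter_sum, b_eq_filter_sum]
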